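-- pv_equiv track=rewrite | github.com/satish1373/agentic_tc_gen | fixed_test_generator_2.py | _assess_security_needs
-- ===== SOURCE A (Python) =====
-- from typing import List, Dict, Any, Optional, Tuple, Set
--
-- def _assess_security_needs(text: str) -> Dict[str, Any]:
--     """Assess security testing needs"""
--     needs = {
--         'authentication_testing': False,
--         'authorization_testing': False,
--         'injection_testing': False,
--         'encryption_testing': False,
--         'session_testing': False
--     }
--
--     if any(keyword in text for keyword in ['login', 'authentication', 'password']):
--         needs['authentication_testing'] = True
--
--     if any(keyword in text for keyword in ['permission', 'access', 'role', 'authorization']):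
--         needs['authorization_testing'] = True
--
--     if any(keyword in text for keyword in ['input', 'form', 'data entry']):
--         needs['injection_testing'] = True
--
--     if any(keyword in text for keyword in ['encrypt', 'secure', 'protection']):
--         needs['encryption_testing'] = True
--
--     if any(keyword in text for keyword in ['session', 'token', 'cookie']):
--         needs['session_testing'] = True
--
--     return needs
-- ===== SOURCE B (Python) =====
-- # B: single left-to-right scan of the text; at each position every keyword is tried
-- # via startswith and maps through a keyword->need table into a found-set, from which
-- # the result dict is built. A instead runs one substring search per keyword.
-- _KEYWORD_NEED = [
--     ('login', 'authentication_testing'),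
--     ('authentication', 'authentication_testing'),
--     ('password', 'authentication_testing'),
--     ('permission', 'authorization_testing'),
--     ('access', 'authorization_testing'),
--     ('role', 'authorization_testing'),
--     ('authorization', 'authorization_testing'),
--     ('input', 'injection_testing'),
--     ('form', 'injection_testing'),
--     ('data entry', 'injection_testing'),
--     ('encrypt', 'encryption_testing'),
--     ('secure', 'encryption_testing'),
--     ('protection', 'encryption_testing'),
--     ('session', 'session_testing'),
--     ('token', 'session_testing'),
--     ('cookie', 'session_testing'),
-- ]
--
-- _NEED_ORDER = [
--     'authentication_testing', 'authorization_testing', 'injection_testing',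
--     'encryption_testing', 'session_testing',
-- ]
--
-- def _assess_security_needs(text: str):
--     """Assess security testing needs"""
--     found = set()
--     for i in range(len(text)):
--         for kw, need in _KEYWORD_NEED:
--             if text.startswith(kw, i):
--                 found.add(need)
--     return {name: name in found for name in _NEED_ORDER}
-- ===== Notes on version B (the rewrite author's own statement) =====
-- stated objective: alternative
-- what changed: B scans the text once position by position, testing each keyword with startswith at that position and collecting the matched needs in a set via a keyword->need table, then builds the dict from the set; A instead runs an independent whole-text substring search per keyword inside five hardcoded branches.
import Mathlib
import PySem

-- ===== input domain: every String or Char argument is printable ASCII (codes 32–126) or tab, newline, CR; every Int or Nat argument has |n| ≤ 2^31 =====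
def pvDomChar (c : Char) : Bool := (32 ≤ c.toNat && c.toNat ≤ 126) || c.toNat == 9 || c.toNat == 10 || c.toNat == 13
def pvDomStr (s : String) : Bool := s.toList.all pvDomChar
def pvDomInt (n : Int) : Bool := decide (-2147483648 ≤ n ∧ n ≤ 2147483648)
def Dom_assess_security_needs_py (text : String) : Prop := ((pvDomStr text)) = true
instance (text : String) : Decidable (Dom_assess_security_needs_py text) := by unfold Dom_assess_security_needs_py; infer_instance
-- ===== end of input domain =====

-- B replaces A's per-keyword substring searches by a single positional scan of the text
-- driving a keyword->need table into a found-set (alternative algorithm).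


-- ===== PORT A =====
-- Literal port of A: the initial five-key dict, then five conditional insertions.
def assess_security_needs_py (text : String) : List (String × Bool) :=
  let needs : PySem.Dict String Bool := PySem.Dict.ofList
    [("authentication_testing", false), ("authorization_testing", false),
     ("injection_testing", false), ("encryption_testing", false), ("session_testing", false)]
  let needs := if ["login", "authentication", "password"].any (fun keyword => PySem.Str.isIn keyword text)
    then needs.insert "authentication_testing" true else needs
  let needs := if ["permission", "access", "role", "authorization"].any (fun keyword => PySem.Str.isIn keyword text)
    then needs.insert "authorization_testing" true else needs
  let needs := if ["input", "form", "data entry"].any (fun keyword => PySem.Str.isIn keyword text)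
    then needs.insert "injection_testing" true else needs
  let needs := if ["encrypt", "secure", "protection"].any (fun keyword => PySem.Str.isIn keyword text)
    then needs.insert "encryption_testing" true else needs
  let needs := if ["session", "token", "cookie"].any (fun keyword => PySem.Str.isIn keyword text)
    then needs.insert "session_testing" true else needs
  needs.items

-- ===== PORT B =====
def keywordNeed : List (String × String) :=
  [("login", "authentication_testing"), ("authentication", "authentication_testing"),
   ("password", "authentication_testing"),
   ("permission", "authorization_testing"), ("access", "authorization_testing"),
   ("role", "authorization_testing"), ("authorization", "authorization_testing"),
   ("input", "injection_testing"), ("form", "injection_testing"), ("data entry", "injection_testing"),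
   ("encrypt", "encryption_testing"), ("secure", "encryption_testing"), ("protection", "encryption_testing"),
   ("session", "session_testing"), ("token", "session_testing"), ("cookie", "session_testing")]

def needOrder : List String :=
  ["authentication_testing", "authorization_testing", "injection_testing",
   "encryption_testing", "session_testing"]

-- one positional scan: for every i in range(len(text)), every table entry whose keyword
-- starts at i puts its need into the found-set.
-- text.startswith(kw, i) with 0 ≤ i ≤ len(text) is exactly kw.toList.isPrefixOf (text.toList.drop i).
def foundNeeds (text : String) : PySem.Set String :=
  (List.range text.toList.length).foldl
    (fun found i => keywordNeed.foldl
      (fun found kn => if kn.1.toList.isPrefixOf (text.toList.drop i) then PySem.Set.add found kn.2 else found)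
      found)
    PySem.Set.empty

def assess_security_needs_py_alt (text : String) : List (String × Bool) :=
  let found := foundNeeds text
  needOrder.map (fun name => (name, PySem.Set.contains found name))

-- ===== PRECONDITION & SPEC =====
def Spec_assess_security_needs_py (text : String) (out : List (String × Bool)) : Prop := out = assess_security_needs_py_alt text
instance (text : String) (out : List (String × Bool)) : Decidable (Spec_assess_security_needs_py text out) := by unfold Spec_assess_security_needs_py; infer_instance

-- ===== CLAIM (what is proved, stated in full; the proofs are below) =====
def Claim_equal_assess_security_needs_py : Prop := ∀ (text : String), Dom_assess_security_needs_py text → Spec_assess_security_needs_py text (assess_security_needs_py text)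

-- ===== LEMMAS AND PROOFS =====

-- With the five branch conditions abstracted as booleans, A's dict pipeline yields a plain pair list.
theorem pipeline_items (b1 b2 b3 b4 b5 : Bool) :
  (let needs : PySem.Dict String Bool := PySem.Dict.ofList
    [("authentication_testing", false), ("authorization_testing", false),
     ("injection_testing", false), ("encryption_testing", false), ("session_testing", false)]
   let needs := if b1 then needs.insert "authentication_testing" true else needs
   let needs := if b2 then needs.insert "authorization_testing" true else needs
   let needs := if b3 then needs.insert "injection_testing" true else needs
   let needs := if b4 then needs.insert "encryption_testing" true else needs
   let needs := if b5 then needs.insert "session_testing" true else needs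
   needs.items) =
  [("authentication_testing", b1), ("authorization_testing", b2), ("injection_testing", b3),
   ("encryption_testing", b4), ("session_testing", b5)] := by
  cases b1 <;> cases b2 <;> cases b3 <;> cases b4 <;> cases b5 <;> rfl

-- membership in the inner fold over the keyword table
theorem mem_inner_fold (cs : List Char) (l : List (String × String)) (acc : PySem.Set String) (n : String) :
  n ∈ l.foldl (fun found kn => if kn.1.toList.isPrefixOf cs then PySem.Set.add found kn.2 else found) acc
    ↔ n ∈ acc ∨ ∃ kn ∈ l, kn.1.toList.isPrefixOf cs = true ∧ kn.2 = n := by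
  induction l generalizing acc with
  | nil => simp
  | cons kn l ih =>
    simp only [List.foldl_cons, ih]
    by_cases h : kn.1.toList.isPrefixOf cs
    · have h' : kn.1.toList <+: cs := List.isPrefixOf_iff_prefix.mp h
      simp [h, PySem.Set.mem_add]
      aesop
    · simp [h]
      aesop

-- membership in the outer fold over the positions
theorem mem_foundNeeds (text : String) (n : String) :
  n ∈ foundNeeds text ↔
    ∃ i, i < text.toList.length ∧
      ∃ kn ∈ keywordNeed, kn.1.toList.isPrefixOf (text.toList.drop i) = true ∧ kn.2 = n := by
  unfold foundNeeds
  have key : ∀ (L : List Nat) (acc : PySem.Set String),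
      n ∈ L.foldl (fun found i => keywordNeed.foldl
        (fun found kn => if kn.1.toList.isPrefixOf (text.toList.drop i) then PySem.Set.add found kn.2 else found)
        found) acc
      ↔ n ∈ acc ∨ ∃ i ∈ L, ∃ kn ∈ keywordNeed,
          kn.1.toList.isPrefixOf (text.toList.drop i) = true ∧ kn.2 = n := by
    intro L
    induction L with
    | nil => simp
    | cons i L ih =>
      intro acc
      simp only [List.foldl_cons, ih, mem_inner_fold]
      constructor
      · rintro (h | h)
        · rcases h with h | h
          · exact Or.inl h
          · exact Or.inr ⟨i, by simp, h⟩
        · rcases h with ⟨j, hj, h⟩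
          exact Or.inr ⟨j, by simp [hj], h⟩
      · rintro (h | ⟨j, hj, h⟩)
        · exact Or.inl (Or.inl h)
        · rcases List.mem_cons.mp hj with rfl | hj
          · exact Or.inl (Or.inr h)
          · exact Or.inr ⟨j, hj, h⟩
  rw [key]
  simp [PySem.Set.empty, List.mem_range]

-- bounded positional match ⇔ Python substring containment, for a nonempty keyword
theorem bounded_match_iff_isIn (sub s : List Char) (hs : sub ≠ []) :
  (∃ i, i < s.length ∧ sub.isPrefixOf (s.drop i) = true) ↔ PySem.Chars.isIn sub s = true := by
  rw [← PySem.Chars.exists_prefix_drop_iff_isIn]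
  constructor
  · rintro ⟨i, _, h⟩
    exact ⟨i, List.isPrefixOf_iff_prefix.mp h⟩
  · rintro ⟨j, h⟩
    by_cases hj : j < s.length
    · exact ⟨j, hj, List.isPrefixOf_iff_prefix.mpr h⟩
    · exfalso
      rw [List.drop_eq_nil_of_le (le_of_not_gt hj)] at h
      exact hs (List.prefix_nil.mp h)

-- the found-set flag for one need equals A's any-keyword test, stated per need below
theorem contains_found_eq (text : String) (name : String) (kws : List String)
  (hne : ∀ k ∈ kws, k.toList ≠ [])
  (htab : ∀ kn ∈ keywordNeed, kn.2 = name ↔ kn.1 ∈ kws)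
  (hmem : ∀ k ∈ kws, (k, name) ∈ keywordNeed) :
  PySem.Set.contains (foundNeeds text) name = kws.any (fun k => PySem.Str.isIn k text) := by
  rw [Bool.eq_iff_iff, PySem.Set.contains_iff, mem_foundNeeds, List.any_eq_true]
  constructor
  · rintro ⟨i, hi, kn, hkn, hpre, hn⟩
    refine ⟨kn.1, (htab kn hkn).mp hn, ?_⟩
    rw [PySem.Str.isIn_eq]
    exact (bounded_match_iff_isIn _ _ (hne _ ((htab kn hkn).mp hn))).mp ⟨i, hi, hpre⟩
  · rintro ⟨k, hk, hin⟩
    rw [PySem.Str.isIn_eq] at hin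
    rcases (bounded_match_iff_isIn _ _ (hne _ hk)).mpr hin with ⟨i, hi, hpre⟩
    exact ⟨i, hi, (k, name), hmem k hk, hpre, rfl⟩

-- ===== VERDICT (by name: the statement is the Claim_ definition above) =====
theorem assess_security_needs_py_spec : Claim_equal_assess_security_needs_py := by
  intro text _
  unfold Spec_assess_security_needs_py
  unfold assess_security_needs_py
  rw [pipeline_items]
  unfold assess_security_needs_py_alt needOrder
  simp only [List.map]
  have h1 := contains_found_eq text "authentication_testing" ["login", "authentication", "password"]
    (by decide) (by decide) (by decide)
  have h2 := contains_found_eq text "authorization_testing" ["permission", "access", "role", "authorization"]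
    (by decide) (by decide) (by decide)
  have h3 := contains_found_eq text "injection_testing" ["input", "form", "data entry"]
    (by decide) (by decide) (by decide)
  have h4 := contains_found_eq text "encryption_testing" ["encrypt", "secure", "protection"]
    (by decide) (by decide) (by decide)
  have h5 := contains_found_eq text "session_testing" ["session", "token", "cookie"]
    (by decide) (by decide) (by decide)
  rw [h1, h2, h3, h4, h5]
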